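-- pv_equiv track=rewrite | github.com/pinkyj81/Mysecretary | app.py | normalize_schedule_data
-- ===== SOURCE A (Python) =====
-- SCHEDULE_TYPES = {'schedule', 'todo', 'detail', 'title', 'routine'}
--
-- def normalize_schedule_data(raw_description: str | None, explicit_type: str | None = None) -> tuple[str, str]:
--     explicit = (explicit_type or '').strip().lower()
--     if explicit == 'plan':
--         explicit = 'schedule'
--     if explicit in SCHEDULE_TYPES:
--         return explicit, (raw_description or '').strip()
--
--     description = (raw_description or '').strip()
--     lowered = description.lower()
--
--     for prefix, schedule_type in (
--         ('[schedule]', 'schedule'),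
--         ('[plan]', 'schedule'),
--         ('[routine]', 'routine'),
--         ('[title]', 'title'),
--         ('[todo]', 'todo'),
--         ('[detail]', 'detail')
--     ):
--         if lowered.startswith(prefix):
--             return schedule_type, description[len(prefix):].strip()
--
--     upper = description.upper()
--     if upper == 'TODO':
--         return 'todo', ''
--     if upper == 'DETAIL':
--         return 'detail', ''
--     if upper == 'TITLE':
--         return 'title', ''
--     if upper == 'SCHEDULE':
--         return 'schedule', ''
--     if upper == 'ROUTINE':
--         return 'routine', ''
--     if upper == 'PLAN':
--         return 'schedule', ''
--
--     return 'schedule', description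
-- ===== SOURCE B (Python) =====
-- SCHEDULE_TYPES = {'schedule', 'todo', 'detail', 'title', 'routine'}
--
--
-- def normalize_schedule_data(raw_description, explicit_type=None):
--     explicit = (explicit_type or '').strip().lower()
--     if explicit == 'plan':
--         explicit = 'schedule'
--     if explicit in SCHEDULE_TYPES:
--         return explicit, (raw_description or '').strip()
--
--     description = (raw_description or '').strip()
--
--     # Parse the bracket structure once instead of testing fixed prefixes.
--     if description.startswith('['):
--         inner, sep, rest = description[1:].partition(']')
--         if sep:
--             key = inner.lower()
--             if key == 'plan':
--                 key = 'schedule'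
--             if key in SCHEDULE_TYPES:
--                 return key, rest.strip()
--
--     word = description.lower()
--     if word == 'plan':
--         word = 'schedule'
--     if word in SCHEDULE_TYPES:
--         return word, ''
--     return 'schedule', description
-- ===== Notes on version B (the rewrite author's own statement) =====
-- stated objective: simpler
-- what changed: B parses the bracket structure once with partition at the first closing bracket and one canonical lowercase lookup in SCHEDULE_TYPES, instead of A's six fixed-prefix startswith tests followed by six upper-cased whole-word comparisons.
import Mathlib
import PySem

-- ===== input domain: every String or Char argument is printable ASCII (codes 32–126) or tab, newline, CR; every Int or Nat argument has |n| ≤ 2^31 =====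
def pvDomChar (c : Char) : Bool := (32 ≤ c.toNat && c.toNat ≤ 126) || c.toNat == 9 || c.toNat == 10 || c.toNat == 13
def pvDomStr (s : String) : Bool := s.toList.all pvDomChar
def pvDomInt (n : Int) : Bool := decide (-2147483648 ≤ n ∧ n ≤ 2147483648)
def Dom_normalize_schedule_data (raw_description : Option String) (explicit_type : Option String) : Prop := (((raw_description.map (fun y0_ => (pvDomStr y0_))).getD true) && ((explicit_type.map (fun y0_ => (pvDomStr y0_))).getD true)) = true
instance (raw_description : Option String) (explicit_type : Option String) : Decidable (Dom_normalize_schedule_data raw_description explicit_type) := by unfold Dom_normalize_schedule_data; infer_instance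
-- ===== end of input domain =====

-- B replaces A's six fixed-prefix startswith tests and six upper-cased word comparisons by parsing
-- the bracket structure once (partition at the first closing bracket) and one canonical lowercase lookup (objective: simpler).

-- ===== PORT A =====
-- for prefix, schedule_type in (…): if lowered.startswith(prefix): return …
def pvPrefixLoop (lowered description : List Char) : List (List Char × String) → Option (String × String)
  | [] => none
  | (p, t) :: rest =>
      if PySem.Chars.startswith lowered p then
        some (t, String.ofList (PySem.Chars.strip (description.drop p.length)))
      else pvPrefixLoop lowered description rest

def normalize_schedule_data (raw_description : Option String) (explicit_type : Option String) : String × String :=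
  let explicit0 := PySem.Chars.lower (PySem.Chars.strip (explicit_type.getD "").toList)
  let explicit := if explicit0 = "plan".toList then "schedule".toList else explicit0
  if explicit = "schedule".toList ∨ explicit = "todo".toList ∨ explicit = "detail".toList ∨
     explicit = "title".toList ∨ explicit = "routine".toList then
    (String.ofList explicit, String.ofList (PySem.Chars.strip (raw_description.getD "").toList))
  else
    let description := PySem.Chars.strip (raw_description.getD "").toList
    let lowered := PySem.Chars.lower description
    match pvPrefixLoop lowered description
        [("[schedule]".toList, "schedule"), ("[plan]".toList, "schedule"),
         ("[routine]".toList, "routine"), ("[title]".toList, "title"),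
         ("[todo]".toList, "todo"), ("[detail]".toList, "detail")] with
    | some r => r
    | none =>
      let upper := PySem.Chars.upper description
      if upper = "TODO".toList then ("todo", "")
      else if upper = "DETAIL".toList then ("detail", "")
      else if upper = "TITLE".toList then ("title", "")
      else if upper = "SCHEDULE".toList then ("schedule", "")
      else if upper = "ROUTINE".toList then ("routine", "")
      else if upper = "PLAN".toList then ("schedule", "")
      else ("schedule", String.ofList description)

-- ===== PORT B =====
def pvCanon (k : List Char) : List Char := if k = "plan".toList then "schedule".toList else k

def pvIsType (k : List Char) : Bool :=
  ["schedule", "todo", "detail", "title", "routine"].any (fun t => t.toList = k)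

-- inner, sep, rest = description[1:].partition(']'): inner/rest as takeWhile/dropWhile at the first ']'
def pvBracket (d : List Char) : Option (String × String) :=
  if PySem.Chars.startswith d "[".toList then
    let t := d.tail
    let inner := t.takeWhile (fun c => c != ']')
    let rest := t.dropWhile (fun c => c != ']')
    if rest ≠ [] then
      let key := pvCanon (PySem.Chars.lower inner)
      if pvIsType key then some (String.ofList key, String.ofList (PySem.Chars.strip (rest.drop 1)))
      else none
    else none
  else none

def normalize_schedule_data_alt (raw_description : Option String) (explicit_type : Option String) : String × String :=
  let explicit := pvCanon (PySem.Chars.lower (PySem.Chars.strip (explicit_type.getD "").toList))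
  if pvIsType explicit then
    (String.ofList explicit, String.ofList (PySem.Chars.strip (raw_description.getD "").toList))
  else
    let d := PySem.Chars.strip (raw_description.getD "").toList
    match pvBracket d with
    | some r => r
    | none =>
      let word := pvCanon (PySem.Chars.lower d)
      if pvIsType word then (String.ofList word, "") else ("schedule", String.ofList d)

-- ===== PRECONDITION & SPEC =====
def Spec_normalize_schedule_data (raw_description : Option String) (explicit_type : Option String) (out : String × String) : Prop := out = normalize_schedule_data_alt raw_description explicit_type
instance (raw_description : Option String) (explicit_type : Option String) (out : String × String) : Decidable (Spec_normalize_schedule_data raw_description explicit_type out) := by unfold Spec_normalize_schedule_data; infer_instance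

-- ===== CLAIM (what is proved, stated in full; the proofs are below) =====
def Claim_equal_normalize_schedule_data : Prop := ∀ (raw_description : Option String) (explicit_type : Option String), Dom_normalize_schedule_data raw_description explicit_type → Spec_normalize_schedule_data raw_description explicit_type (normalize_schedule_data raw_description explicit_type)

-- ===== LEMMAS AND PROOFS =====

theorem pv_char_toNat_ofNat {n : Nat} (h : n < 0xD800) : (Char.ofNat n).toNat = n := by
  simp only [Char.ofNat]
  rw [dif_pos (by exact Or.inl h)]
  simp only [Char.ofNatAux, Char.toNat, UInt32.toNat, BitVec.toNat_ofNatLT]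

theorem pv_char_le_iff (a c : Char) : (a ≤ c) ↔ a.toNat ≤ c.toNat := by
  rw [Char.le_def, ← Char.toNat_val, ← Char.toNat_val]
  exact UInt32.le_iff_toNat_le

theorem pv_lowerChar_upperChar (c : Char) :
    PySem.Chars.lowerChar (PySem.Chars.upperChar c) = PySem.Chars.lowerChar c := by
  by_cases h : PySem.Chars.islower c = true
  · have hn : 97 ≤ c.toNat ∧ c.toNat ≤ 122 := by
      have := h
      simp only [PySem.Chars.islower, Bool.and_eq_true, decide_eq_true_eq, pv_char_le_iff,
        (by decide : 'a'.toNat = 97), (by decide : 'z'.toNat = 122)] at this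
      exact this
    have h2 : (Char.ofNat (c.toNat - 32)).toNat = c.toNat - 32 := pv_char_toNat_ofNat (by omega)
    have hni : PySem.Chars.isupper c = false := by
      simp only [PySem.Chars.isupper, Bool.and_eq_false_iff, decide_eq_false_iff_not, pv_char_le_iff,
        (by decide : 'A'.toNat = 65), (by decide : 'Z'.toNat = 90)]
      omega
    simp only [PySem.Chars.upperChar, h, if_true, PySem.Chars.lowerChar, hni, if_false,
      Bool.false_eq_true]
    rw [if_pos, h2]
    · have h3 : c.toNat - 32 + 32 = c.toNat := by omega
      rw [h3, Char.ofNat_toNat]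
    · simp only [PySem.Chars.isupper, Bool.and_eq_true, decide_eq_true_eq, pv_char_le_iff, h2,
        (by decide : 'A'.toNat = 65), (by decide : 'Z'.toNat = 90)]
      omega
  · simp [PySem.Chars.upperChar, h]

theorem pv_upperChar_lowerChar (c : Char) :
    PySem.Chars.upperChar (PySem.Chars.lowerChar c) = PySem.Chars.upperChar c := by
  by_cases h : PySem.Chars.isupper c = true
  · have hn : 65 ≤ c.toNat ∧ c.toNat ≤ 90 := by
      have := h
      simp only [PySem.Chars.isupper, Bool.and_eq_true, decide_eq_true_eq, pv_char_le_iff,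
        (by decide : 'A'.toNat = 65), (by decide : 'Z'.toNat = 90)] at this
      exact this
    have h2 : (Char.ofNat (c.toNat + 32)).toNat = c.toNat + 32 := pv_char_toNat_ofNat (by omega)
    have hni : PySem.Chars.islower c = false := by
      simp only [PySem.Chars.islower, Bool.and_eq_false_iff, decide_eq_false_iff_not, pv_char_le_iff,
        (by decide : 'a'.toNat = 97), (by decide : 'z'.toNat = 122)]
      omega
    simp only [PySem.Chars.lowerChar, h, if_true, PySem.Chars.upperChar, hni, if_false,
      Bool.false_eq_true]
    rw [if_pos, h2]
    · have h3 : c.toNat + 32 - 32 = c.toNat := by omega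
      rw [h3, Char.ofNat_toNat]
    · simp only [PySem.Chars.islower, Bool.and_eq_true, decide_eq_true_eq, pv_char_le_iff, h2,
        (by decide : 'a'.toNat = 97), (by decide : 'z'.toNat = 122)]
      omega
  · simp [PySem.Chars.upperChar, PySem.Chars.lowerChar, h]

-- lowerChar is the identity at characters that are not letters, and nothing else maps there
theorem pv_lowerChar_eq_nonletter_iff (c d : Char)
    (hd1 : ¬ (65 ≤ d.toNat ∧ d.toNat ≤ 90)) (hd2 : ¬ (97 ≤ d.toNat ∧ d.toNat ≤ 122)) :
    PySem.Chars.lowerChar c = d ↔ c = d := by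
  by_cases h : PySem.Chars.isupper c = true
  · have hn : 65 ≤ c.toNat ∧ c.toNat ≤ 90 := by
      have := h
      simp only [PySem.Chars.isupper, Bool.and_eq_true, decide_eq_true_eq, pv_char_le_iff,
        (by decide : 'A'.toNat = 65), (by decide : 'Z'.toNat = 90)] at this
      exact this
    have h2 : (Char.ofNat (c.toNat + 32)).toNat = c.toNat + 32 := pv_char_toNat_ofNat (by omega)
    simp only [PySem.Chars.lowerChar, h, if_true]
    constructor
    · intro he
      exfalso
      apply hd2
      rw [← he, h2]
      omega
    · intro he
      exfalso
      apply hd1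
      rw [← he]
      exact hn
  · simp [PySem.Chars.lowerChar, h]

theorem pv_lower_lbracket (c : Char) : PySem.Chars.lowerChar c = '[' ↔ c = '[' :=
  pv_lowerChar_eq_nonletter_iff c '[' (by decide) (by decide)

theorem pv_lower_rbracket (c : Char) : PySem.Chars.lowerChar c = ']' ↔ c = ']' :=
  pv_lowerChar_eq_nonletter_iff c ']' (by decide) (by decide)

theorem pv_lower_upper_list (x : List Char) :
    PySem.Chars.lower (PySem.Chars.upper x) = PySem.Chars.lower x := by
  simp [PySem.Chars.lower, PySem.Chars.upper, Function.comp_def, pv_lowerChar_upperChar]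

theorem pv_upper_lower_list (x : List Char) :
    PySem.Chars.upper (PySem.Chars.lower x) = PySem.Chars.upper x := by
  simp [PySem.Chars.lower, PySem.Chars.upper, Function.comp_def, pv_upperChar_lowerChar]

-- upper d = U ↔ lower d = s, whenever s is already lowercase with upper s = U
theorem pv_upper_eq_iff (d s u : List Char)
    (h1 : PySem.Chars.lower s = s) (h2 : PySem.Chars.upper s = u) :
    PySem.Chars.upper d = u ↔ PySem.Chars.lower d = s := by
  constructor
  · intro h
    calc PySem.Chars.lower d = PySem.Chars.lower (PySem.Chars.upper d) := (pv_lower_upper_list d).symm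
      _ = PySem.Chars.lower u := by rw [h]
      _ = PySem.Chars.lower (PySem.Chars.upper s) := by rw [h2]
      _ = PySem.Chars.lower s := pv_lower_upper_list s
      _ = s := h1
  · intro h
    calc PySem.Chars.upper d = PySem.Chars.upper (PySem.Chars.lower d) := (pv_upper_lower_list d).symm
      _ = PySem.Chars.upper s := by rw [h]
      _ = u := h2

-- unique splitting at the first ']'
theorem pv_uniq_split (name xs v : List Char) (hn : ']' ∉ name) (hx : ']' ∉ xs) :
    (name ++ [']']) <+: (xs ++ ']' :: v) ↔ name = xs := by
  induction name generalizing xs with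
  | nil =>
    cases xs with
    | nil => simp
    | cons x xt =>
      simp only [List.nil_append, List.cons_append, List.cons_prefix_cons]
      constructor
      · rintro ⟨h, -⟩
        exact absurd h.symm (by simp at hx; tauto)
      · intro h
        exact absurd h (by simp)
  | cons a at' ih =>
    cases xs with
    | nil =>
      simp only [List.cons_append, List.nil_append, List.cons_prefix_cons]
      constructor
      · rintro ⟨h, -⟩
        exact absurd h (by simp at hn; tauto)
      · intro h
        exact absurd h (by simp)
    | cons x xt =>
      simp only [List.cons_append, List.cons_prefix_cons]
      have := ih (fun h => hn (List.mem_cons_of_mem _ h)) (xs := xt) (fun h => hx (List.mem_cons_of_mem _ h))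
      constructor
      · rintro ⟨h1, h2⟩
        rw [h1, this.mp h2]
      · intro h
        injection h with h1 h2
        exact ⟨h1, this.mpr h2⟩

theorem pv_no_rbracket_lower (t : List Char) (h : ']' ∉ t) : ']' ∉ PySem.Chars.lower t := by
  simp only [PySem.Chars.lower, List.mem_map]
  rintro ⟨c, hc, he⟩
  exact h ((pv_lower_rbracket c).mp he ▸ hc)



theorem pv_isType_iff (w : List Char) :
    pvIsType w = true ↔ (w = "schedule".toList ∨ w = "todo".toList ∨ w = "detail".toList ∨
      w = "title".toList ∨ w = "routine".toList) := by
  unfold pvIsType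
  simp only [List.any_cons, List.any_nil, Bool.or_eq_true, decide_eq_true_eq, Bool.or_false]
  constructor
  · rintro (h|h|h|h|h) <;> subst h <;> decide
  · rintro (h|h|h|h|h) <;> subst h <;> decide

theorem pv_canon_mem (w : List Char) :
    pvIsType (pvCanon w) = true ↔ (w = "schedule".toList ∨ w = "plan".toList ∨ w = "routine".toList ∨
      w = "title".toList ∨ w = "todo".toList ∨ w = "detail".toList) := by
  by_cases h : w = "plan".toList
  · subst h; decide
  · rw [show pvCanon w = w from if_neg h, pv_isType_iff]
    constructor
    · rintro (h1|h1|h1|h1|h1) <;> subst h1 <;> decide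
    · rintro (h1|h1|h1|h1|h1|h1) <;> first | (subst h1; decide) | (exact absurd h1 h)

theorem pv_lower_cons_bracket (t : List Char) :
    PySem.Chars.lower ('[' :: t) = '[' :: PySem.Chars.lower t := by
  simp [PySem.Chars.lower]
  decide

theorem pv_lower_split (inner r : List Char) :
    PySem.Chars.lower (inner ++ ']' :: r) = PySem.Chars.lower inner ++ ']' :: PySem.Chars.lower r := by
  simp [PySem.Chars.lower]
  decide

theorem pv_startswith_bracket (inner r name : List Char) (hi : ']' ∉ inner) (hn : ']' ∉ name) :
    (PySem.Chars.startswith (PySem.Chars.lower ('[' :: (inner ++ ']' :: r))) ('[' :: (name ++ [']'])) = true)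
      ↔ PySem.Chars.lower inner = name := by
  rw [pv_lower_cons_bracket, pv_lower_split, PySem.Chars.startswith_iff, List.cons_prefix_cons]
  simp only [true_and]
  rw [pv_uniq_split name _ _ hn (pv_no_rbracket_lower inner hi)]
  exact eq_comm

theorem pv_startswith_no_rbracket (t name : List Char) (h : ']' ∉ t) :
    PySem.Chars.startswith (PySem.Chars.lower ('[' :: t)) ('[' :: (name ++ [']'])) = false := by
  rw [pv_lower_cons_bracket]
  apply Bool.eq_false_iff.mpr
  intro hsw
  rw [PySem.Chars.startswith_iff, List.cons_prefix_cons] at hsw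
  have hm : ']' ∈ PySem.Chars.lower t := hsw.2.sublist.mem (by simp)
  exact pv_no_rbracket_lower t h hm

theorem pv_startswith_not_bracket (c : Char) (t name : List Char) (hc : c ≠ '[') :
    PySem.Chars.startswith (PySem.Chars.lower (c :: t)) ('[' :: name) = false := by
  apply Bool.eq_false_iff.mpr
  intro hsw
  rw [show PySem.Chars.lower (c :: t) = PySem.Chars.lowerChar c :: PySem.Chars.lower t from rfl,
    PySem.Chars.startswith_iff, List.cons_prefix_cons] at hsw
  exact hc ((pv_lower_lbracket c).mp hsw.1.symm)

theorem pv_takeWhile_split (inner r : List Char) (hi : ']' ∉ inner) :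
    (inner ++ ']' :: r).takeWhile (fun c => c != ']') = inner := by
  induction inner with
  | nil => simp
  | cons a t ih =>
    have ha : a ≠ ']' := fun h => hi (h ▸ List.mem_cons_self)
    simp only [List.cons_append, List.takeWhile_cons, bne_iff_ne, ne_eq, ha, not_false_eq_true,
      if_true, List.cons.injEq, true_and]
    exact ih (fun h => hi (List.mem_cons_of_mem _ h))

theorem pv_dropWhile_split (inner r : List Char) (hi : ']' ∉ inner) :
    (inner ++ ']' :: r).dropWhile (fun c => c != ']') = ']' :: r := by
  induction inner with
  | nil => simp
  | cons a t ih =>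
    have ha : a ≠ ']' := fun h => hi (h ▸ List.mem_cons_self)
    simp only [List.cons_append, List.dropWhile_cons, bne_iff_ne, ne_eq, ha, not_false_eq_true,
      if_true]
    exact ih (fun h => hi (List.mem_cons_of_mem _ h))

theorem pv_drop_bracket (inner r : List Char) (m : Nat) (hlen : inner.length + 2 = m) :
    ('[' :: (inner ++ ']' :: r)).drop m = r := by
  subst hlen
  rw [show inner.length + 2 = (inner.length + 1) + 1 from rfl, List.drop_succ_cons,
    List.drop_append]
  simp

theorem pv_lower_len (inner w : List Char) (h : PySem.Chars.lower inner = w) :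
    inner.length = w.length := by
  rw [← h]
  simp [PySem.Chars.lower]

theorem pv_loop_eq (d : List Char) :
    pvPrefixLoop (PySem.Chars.lower d) d
      [("[schedule]".toList, "schedule"), ("[plan]".toList, "schedule"),
       ("[routine]".toList, "routine"), ("[title]".toList, "title"),
       ("[todo]".toList, "todo"), ("[detail]".toList, "detail")] = pvBracket d := by
  have eS : "[schedule]".toList = '[' :: ("schedule".toList ++ [']']) := by decide
  have eP : "[plan]".toList = '[' :: ("plan".toList ++ [']']) := by decide
  have eR : "[routine]".toList = '[' :: ("routine".toList ++ [']']) := by decide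
  have eT : "[title]".toList = '[' :: ("title".toList ++ [']']) := by decide
  have eO : "[todo]".toList = '[' :: ("todo".toList ++ [']']) := by decide
  have eD : "[detail]".toList = '[' :: ("detail".toList ++ [']']) := by decide
  match d with
  | [] => decide
  | c :: t =>
    by_cases hc : c = '['
    case neg =>
      have hB : PySem.Chars.startswith (c :: t) "[".toList = false := by
        apply Bool.eq_false_iff.mpr
        intro h
        rw [show ("[".toList) = ['['] from rfl, PySem.Chars.startswith_iff,
          List.cons_prefix_cons] at h
        exact hc h.1.symm
      simp only [pvPrefixLoop, eS, eP, eR, eT, eO, eD,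
        pv_startswith_not_bracket c t _ hc, Bool.false_eq_true, if_false, pvBracket, hB]
    case pos =>
      subst hc
      have hB : PySem.Chars.startswith ('[' :: t) "[".toList = true := by
        rw [show ("[".toList) = ['['] from rfl, PySem.Chars.startswith_iff]
        simp
      rcases ht : t.dropWhile (fun c => c != ']') with _ | ⟨x, r0⟩
      · -- no ']' in t: every bracket prefix fails and partition finds no separator
        have hnb : ']' ∉ t := by
          intro hm
          have := List.dropWhile_eq_nil_iff.mp ht ']' hm
          simp at this
        simp only [pvPrefixLoop, eS, eP, eR, eT, eO, eD,
          pv_startswith_no_rbracket t _ hnb, Bool.false_eq_true, if_false,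
          pvBracket, hB, if_true, List.tail_cons, ht, ne_eq, not_true_eq_false]
      · -- the first ']' splits t as inner ++ ']' :: r0
        have hx : x = ']' := by
          have h1 := List.head?_dropWhile_not (p := fun c => c != ']') (l := t)
          rw [ht] at h1
          simpa using h1
        subst hx
        have hi : ']' ∉ t.takeWhile (fun c => c != ']') := by
          intro hm
          have := List.mem_takeWhile_imp hm
          simp at this
        have hsplit : t = t.takeWhile (fun c => c != ']') ++ ']' :: r0 := by
          conv_lhs => rw [← List.takeWhile_append_dropWhile (p := fun c => c != ']') (l := t)]
          rw [ht]
        generalize hInner : t.takeWhile (fun c => c != ']') = inner at hi hsplit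
        rw [hsplit]
        have etk := pv_takeWhile_split inner r0 hi
        have edr := pv_dropWhile_split inner r0 hi
        have hB2 : PySem.Chars.startswith ('[' :: (inner ++ ']' :: r0)) "[".toList = true := by
          rw [← hsplit]; exact hB
        simp only [pvPrefixLoop, eS, eP, eR, eT, eO, eD, pvBracket, hB2, if_true,
          List.tail_cons, etk, edr, ne_eq, reduceCtorEq, not_false_eq_true, if_true,
          List.drop_succ_cons, List.drop_zero,
          pv_startswith_bracket inner r0 "schedule".toList hi (by decide),
          pv_startswith_bracket inner r0 "plan".toList hi (by decide),
          pv_startswith_bracket inner r0 "routine".toList hi (by decide),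
          pv_startswith_bracket inner r0 "title".toList hi (by decide),
          pv_startswith_bracket inner r0 "todo".toList hi (by decide),
          pv_startswith_bracket inner r0 "detail".toList hi (by decide)]
        have vS : pvCanon "schedule".toList = "schedule".toList := by decide
        have vP : pvCanon "plan".toList = "schedule".toList := by decide
        have vR : pvCanon "routine".toList = "routine".toList := by decide
        have vT : pvCanon "title".toList = "title".toList := by decide
        have vO : pvCanon "todo".toList = "todo".toList := by decide
        have vD : pvCanon "detail".toList = "detail".toList := by decide
        by_cases h1 : PySem.Chars.lower inner = "schedule".toList
        · rw [if_pos h1, if_pos (by rw [h1, vS]; decide),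
            pv_drop_bracket inner r0 _ (by rw [pv_lower_len inner _ h1]; decide), h1, vS,
            show String.ofList "schedule".toList = "schedule" from by decide]
        · rw [if_neg h1]
          by_cases h2 : PySem.Chars.lower inner = "plan".toList
          · rw [if_pos h2, if_pos (by rw [h2, vP]; decide),
              pv_drop_bracket inner r0 _ (by rw [pv_lower_len inner _ h2]; decide), h2, vP,
              show String.ofList "schedule".toList = "schedule" from by decide]
          · rw [if_neg h2]
            by_cases h3 : PySem.Chars.lower inner = "routine".toList
            · rw [if_pos h3, if_pos (by rw [h3, vR]; decide),
                pv_drop_bracket inner r0 _ (by rw [pv_lower_len inner _ h3]; decide), h3, vR,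
                show String.ofList "routine".toList = "routine" from by decide]
            · rw [if_neg h3]
              by_cases h4 : PySem.Chars.lower inner = "title".toList
              · rw [if_pos h4, if_pos (by rw [h4, vT]; decide),
                  pv_drop_bracket inner r0 _ (by rw [pv_lower_len inner _ h4]; decide), h4, vT,
                  show String.ofList "title".toList = "title" from by decide]
              · rw [if_neg h4]
                by_cases h5 : PySem.Chars.lower inner = "todo".toList
                · rw [if_pos h5, if_pos (by rw [h5, vO]; decide),
                    pv_drop_bracket inner r0 _ (by rw [pv_lower_len inner _ h5]; decide), h5, vO,
                    show String.ofList "todo".toList = "todo" from by decide]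
                · rw [if_neg h5]
                  by_cases h6 : PySem.Chars.lower inner = "detail".toList
                  · rw [if_pos h6, if_pos (by rw [h6, vD]; decide),
                      pv_drop_bracket inner r0 _ (by rw [pv_lower_len inner _ h6]; decide), h6, vD,
                      show String.ofList "detail".toList = "detail" from by decide]
                  · rw [if_neg h6, if_neg]
                    rw [pv_canon_mem]
                    rintro (h | h | h | h | h | h)
                    · exact h1 h
                    · exact h2 h
                    · exact h3 h
                    · exact h4 h
                    · exact h5 h
                    · exact h6 h

theorem pv_word_eq (d : List Char) :
    (if PySem.Chars.upper d = "TODO".toList then (("todo" : String), ("" : String))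
     else if PySem.Chars.upper d = "DETAIL".toList then ("detail", "")
     else if PySem.Chars.upper d = "TITLE".toList then ("title", "")
     else if PySem.Chars.upper d = "SCHEDULE".toList then ("schedule", "")
     else if PySem.Chars.upper d = "ROUTINE".toList then ("routine", "")
     else if PySem.Chars.upper d = "PLAN".toList then ("schedule", "")
     else ("schedule", String.ofList d)) =
    (if pvIsType (pvCanon (PySem.Chars.lower d)) then
      (String.ofList (pvCanon (PySem.Chars.lower d)), "")
     else ("schedule", String.ofList d)) := by
  simp only [pv_upper_eq_iff d "todo".toList "TODO".toList (by decide) (by decide),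
    pv_upper_eq_iff d "detail".toList "DETAIL".toList (by decide) (by decide),
    pv_upper_eq_iff d "title".toList "TITLE".toList (by decide) (by decide),
    pv_upper_eq_iff d "schedule".toList "SCHEDULE".toList (by decide) (by decide),
    pv_upper_eq_iff d "routine".toList "ROUTINE".toList (by decide) (by decide),
    pv_upper_eq_iff d "plan".toList "PLAN".toList (by decide) (by decide)]
  by_cases h1 : PySem.Chars.lower d = "todo".toList
  · rw [if_pos h1, h1, if_pos (show pvIsType (pvCanon "todo".toList) = true from by decide)]; decide
  · rw [if_neg h1]
    by_cases h2 : PySem.Chars.lower d = "detail".toList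
    · rw [if_pos h2, h2, if_pos (show pvIsType (pvCanon "detail".toList) = true from by decide)]; decide
    · rw [if_neg h2]
      by_cases h3 : PySem.Chars.lower d = "title".toList
      · rw [if_pos h3, h3, if_pos (show pvIsType (pvCanon "title".toList) = true from by decide)]; decide
      · rw [if_neg h3]
        by_cases h4 : PySem.Chars.lower d = "schedule".toList
        · rw [if_pos h4, h4, if_pos (show pvIsType (pvCanon "schedule".toList) = true from by decide)]; decide
        · rw [if_neg h4]
          by_cases h5 : PySem.Chars.lower d = "routine".toList
          · rw [if_pos h5, h5, if_pos (show pvIsType (pvCanon "routine".toList) = true from by decide)]; decide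
          · rw [if_neg h5]
            by_cases h6 : PySem.Chars.lower d = "plan".toList
            · rw [if_pos h6, h6, if_pos (show pvIsType (pvCanon "plan".toList) = true from by decide)]; decide
            · rw [if_neg h6, if_neg]
              rw [pv_canon_mem]
              rintro (h | h | h | h | h | h)
              · exact h4 h
              · exact h6 h
              · exact h5 h
              · exact h3 h
              · exact h1 h
              · exact h2 h

-- ===== VERDICT (by name: the statement is the Claim_ definition above) =====
theorem normalize_schedule_data_spec : Claim_equal_normalize_schedule_data := by
  intro raw expl _
  unfold Spec_normalize_schedule_data normalize_schedule_data normalize_schedule_data_alt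
  simp only []
  rw [show (if (PySem.Chars.lower (PySem.Chars.strip (expl.getD "").toList)) = "plan".toList
        then "schedule".toList else (PySem.Chars.lower (PySem.Chars.strip (expl.getD "").toList)))
      = pvCanon (PySem.Chars.lower (PySem.Chars.strip (expl.getD "").toList)) from rfl]
  by_cases he : pvIsType (pvCanon (PySem.Chars.lower (PySem.Chars.strip (expl.getD "").toList))) = true
  · rw [if_pos he, if_pos ((pv_isType_iff _).mp he)]
  · rw [if_neg he, if_neg (fun h => he ((pv_isType_iff _).mpr h))]
    rw [pv_loop_eq]
    cases pvBracket (PySem.Chars.strip (raw.getD "").toList) with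
    | some r => rfl
    | none => exact pv_word_eq _
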